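-- pv_equiv track=rewrite | github.com/nupsea/luminary | backend/app/routers/tags.py | _compute_inclusive_count
-- ===== SOURCE A (Python) =====
-- def _compute_inclusive_count(
--     tag_id: str,
--     count_by_id: dict[str, int],
--     children_by_parent: dict[str, list[str]],
-- ) -> int:
--     """Recursively sum note_count for tag + all descendants."""
--     direct = count_by_id.get(tag_id, 0)
--     child_sum = sum(
--         _compute_inclusive_count(child, count_by_id, children_by_parent)
--         for child in children_by_parent.get(tag_id, [])
--     )
--     return direct + child_sum
-- ===== SOURCE B (Python) =====
-- def _compute_inclusive_count(
--     tag_id: str,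
--     count_by_id: dict[str, int],
--     children_by_parent: dict[str, list[str]],
-- ) -> int:
--     """Iteratively sum note_count for tag + all descendants via an explicit worklist."""
--     total = 0
--     stack = [tag_id]
--     while stack:
--         node = stack.pop()
--         total += count_by_id.get(node, 0)
--         stack.extend(children_by_parent.get(node, []))
--     return total
-- ===== Notes on version B (the rewrite author's own statement) =====
-- stated objective: alternative
-- what changed: Replaces the recursion over the subtree by an iterative explicit-stack worklist that pops a node, adds its count and pushes its children, returning when the stack is empty.
import Mathlib
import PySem

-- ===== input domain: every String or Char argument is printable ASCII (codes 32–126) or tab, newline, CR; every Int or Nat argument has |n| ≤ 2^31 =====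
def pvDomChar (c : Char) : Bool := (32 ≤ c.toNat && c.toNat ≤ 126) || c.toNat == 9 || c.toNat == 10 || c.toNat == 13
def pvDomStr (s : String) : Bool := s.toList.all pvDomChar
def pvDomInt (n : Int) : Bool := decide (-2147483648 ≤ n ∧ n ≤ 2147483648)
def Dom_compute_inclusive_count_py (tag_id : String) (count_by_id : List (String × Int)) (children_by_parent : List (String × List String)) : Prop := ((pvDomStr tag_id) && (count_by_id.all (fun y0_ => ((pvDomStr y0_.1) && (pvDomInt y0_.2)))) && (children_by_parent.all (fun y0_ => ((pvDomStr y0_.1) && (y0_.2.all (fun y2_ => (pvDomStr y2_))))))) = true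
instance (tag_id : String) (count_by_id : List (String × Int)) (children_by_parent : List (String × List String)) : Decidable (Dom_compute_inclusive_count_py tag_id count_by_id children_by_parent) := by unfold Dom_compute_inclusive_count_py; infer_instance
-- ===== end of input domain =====

-- B replaces A's recursion over the subtree by an explicit-stack worklist loop (alternative
-- decomposition, same cost). Both ports are fuel-guarded transliterations; the fuel suffices on
-- every input admitted by Pre_ (where the Python versions terminate).

-- ===== PORT A =====
-- recursion of A; the Nat fuel only makes the recursion total (on Pre_ inputs it never runs out,
-- since an acyclic recursion chain visits distinct dict keys, hence has depth ≤ #entries + 1)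
def pvGoA (cbi : PySem.Dict String Int) (cbp : PySem.Dict String (List String)) : Nat → String → Int
  | 0, _ => 0
  | f + 1, tag =>
      PySem.Dict.getD cbi tag 0 +
        ((PySem.Dict.getD cbp tag []).map (pvGoA cbi cbp f)).sum

def compute_inclusive_count_py (tag_id : String) (count_by_id : List (String × Int)) (children_by_parent : List (String × List String)) : Int :=
  pvGoA (PySem.Dict.ofList count_by_id) (PySem.Dict.ofList children_by_parent)
    (children_by_parent.length + 1) tag_id

-- ===== PORT B =====
-- bound used only by the termination measure of the worklist loop
def pvFanBound (cbp : PySem.Dict String (List String)) : Nat :=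
  cbp.items.foldl (fun m q => max m q.2.length) 0 + 2

-- termination helpers for pvLoopB (cited by name in its decreasing_by)
theorem pvFoldlMax_le {alpha : Type} (l : List (alpha × List String)) (a : Nat) :
    a ≤ l.foldl (fun m q => max m q.2.length) a := by
  induction l generalizing a with
  | nil => simp
  | cons x xs ih => exact le_trans (Nat.le_max_left _ _) (ih _)

theorem pvMem_le_foldlMax {alpha : Type} (l : List (alpha × List String)) (a : Nat)
    (p : alpha × List String) (hp : p ∈ l) :
    p.2.length ≤ l.foldl (fun m q => max m q.2.length) a := by
  induction l generalizing a with
  | nil => cases hp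
  | cons x xs ih =>
      rcases List.mem_cons.mp hp with rfl | h
      · exact le_trans (Nat.le_max_right _ _) (pvFoldlMax_le xs _)
      · exact ih _ h

theorem pvSumPowMap (x : Nat) (l : List String) :
    (l.map (fun _ => x)).sum = l.length * x := by
  induction l with
  | nil => simp
  | cons y ys ih =>
      simp
      ring

theorem pvGetD_len_lt (cbp : PySem.Dict String (List String)) (node : String) :
    (PySem.Dict.getD cbp node []).length < pvFanBound cbp := by
  unfold pvFanBound
  cases h : PySem.Dict.get? cbp node with
  | none => rw [PySem.Dict.getD_of_get?_eq_none cbp [] h]; simp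
  | some v =>
      rw [PySem.Dict.getD_of_get?_eq_some cbp [] h]
      have hm := PySem.Dict.mem_items_of_get?_eq_some cbp h
      have := pvMem_le_foldlMax cbp.items 0 (node, v) hm
      simp at this
      omega

-- B's while-loop: pop a node (list head models the Python stack top), add its count, push its
-- children. Each stack entry carries a fuel; pushed children get one less (termination guard only).
def pvLoopB (cbi : PySem.Dict String Int) (cbp : PySem.Dict String (List String)) : List (Nat × String) → Int → Int
  | [], acc => acc
  | (0, _) :: rest, acc => pvLoopB cbi cbp rest acc
  | (f + 1, node) :: rest, acc =>
      pvLoopB cbi cbp (((PySem.Dict.getD cbp node []).map (fun c => (f, c))) ++ rest)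
        (acc + PySem.Dict.getD cbi node 0)
  termination_by stack _ => (stack.map (fun p => (pvFanBound cbp) ^ p.1)).sum
  decreasing_by
  · simp
  · have hfan : (PySem.Dict.getD cbp node []).length < pvFanBound cbp := pvGetD_len_lt cbp node
    have h2 : 2 ≤ pvFanBound cbp := by unfold pvFanBound; omega
    have hpow : 0 < pvFanBound cbp ^ f := Nat.pow_pos (show 0 < pvFanBound cbp by omega)
    simp only [List.map_append, List.map_map, List.sum_append, Function.comp_def,
      List.map_cons, List.sum_cons, Nat.succ_eq_add_one]
    have hkey : ((PySem.Dict.getD cbp node []).map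
        (fun _ => pvFanBound cbp ^ f)).sum < pvFanBound cbp ^ (f + 1) := by
      rw [pvSumPowMap]
      calc (PySem.Dict.getD cbp node []).length * pvFanBound cbp ^ f
          < pvFanBound cbp * pvFanBound cbp ^ f := Nat.mul_lt_mul_of_pos_right hfan hpow
        _ = pvFanBound cbp ^ (f + 1) := by ring
    omega

def compute_inclusive_count_py_alt (tag_id : String) (count_by_id : List (String × Int)) (children_by_parent : List (String × List String)) : Int :=
  pvLoopB (PySem.Dict.ofList count_by_id) (PySem.Dict.ofList children_by_parent)
    [(children_by_parent.length + 1, tag_id)] 0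

-- ===== PRECONDITION & SPEC =====
-- Graph helpers for Pre_: bounded-iteration reachability along the children relation.
def pvAddNew (acc : List String) (xs : List String) : List String :=
  xs.foldl (fun a c => if c ∈ a then a else a ++ [c]) acc

def pvStep (cbp : List (String × List String)) (S : List String) : List String :=
  S.foldl (fun a n => pvAddNew a (PySem.Dict.getD (PySem.Dict.ofList cbp) n [])) S

def pvReachFrom (cbp : List (String × List String)) (xs : List String) : List String :=
  (pvStep cbp)^[cbp.length + 1] xs

-- Pre_ excludes exactly the inputs on which Python A does not return: a node on a cycle of the
-- children relation is reachable from tag_id, so A's recursion is infinite (RecursionError).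
def Pre_compute_inclusive_count_py (tag_id : String) (count_by_id : List (String × Int)) (children_by_parent : List (String × List String)) : Prop :=
  ∀ n ∈ pvReachFrom children_by_parent [tag_id],
    n ∉ pvReachFrom children_by_parent (PySem.Dict.getD (PySem.Dict.ofList children_by_parent) n [])
instance (tag_id : String) (count_by_id : List (String × Int)) (children_by_parent : List (String × List String)) : Decidable (Pre_compute_inclusive_count_py tag_id count_by_id children_by_parent) := by unfold Pre_compute_inclusive_count_py; infer_instance

def pvWitness_compute_inclusive_count_py : String × (List (String × Int)) × (List (String × List String)) :=
  ("a", [("a", 2), ("b", 3)], [("a", ["b"])])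

def Spec_compute_inclusive_count_py (tag_id : String) (count_by_id : List (String × Int)) (children_by_parent : List (String × List String)) (out : Int) : Prop := out = compute_inclusive_count_py_alt tag_id count_by_id children_by_parent
instance (tag_id : String) (count_by_id : List (String × Int)) (children_by_parent : List (String × List String)) (out : Int) : Decidable (Spec_compute_inclusive_count_py tag_id count_by_id children_by_parent out) := by unfold Spec_compute_inclusive_count_py; infer_instance

-- ===== CLAIM (what is proved, stated in full; the proofs are below) =====
def Claim_equal_compute_inclusive_count_py : Prop := ∀ (tag_id : String) (count_by_id : List (String × Int)) (children_by_parent : List (String × List String)), Dom_compute_inclusive_count_py tag_id count_by_id children_by_parent → Pre_compute_inclusive_count_py tag_id count_by_id children_by_parent → Spec_compute_inclusive_count_py tag_id count_by_id children_by_parent (compute_inclusive_count_py tag_id count_by_id children_by_parent)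

-- ===== LEMMAS AND PROOFS =====

-- loop invariant: the worklist loop sums pvGoA over the stack entries
theorem pvLoopB_eq (cbi : PySem.Dict String Int) (cbp : PySem.Dict String (List String))
    (stack : List (Nat × String)) (acc : Int) :
    pvLoopB cbi cbp stack acc = acc + (stack.map (fun p => pvGoA cbi cbp p.1 p.2)).sum := by
  induction stack, acc using pvLoopB.induct cbi cbp with
  | case1 acc => simp [pvLoopB]
  | case2 _ rest acc ih => simp [pvLoopB, pvGoA, ih]
  | case3 f node rest acc ih =>
      simp only [pvLoopB, ih, List.map_append, List.map_map, List.sum_append, Function.comp_def,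
        pvGoA, List.map_cons, List.sum_cons, Nat.succ_eq_add_one]
      ring

-- ===== VERDICT (by name: the statement is the Claim_ definition above) =====
theorem compute_inclusive_count_py_spec : Claim_equal_compute_inclusive_count_py := by
  intro tag_id count_by_id children_by_parent _ _
  unfold Spec_compute_inclusive_count_py compute_inclusive_count_py compute_inclusive_count_py_alt
  rw [pvLoopB_eq]
  simp
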